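-- pv_equiv track=rewrite | github.com/crap0101/laundry_basket | merge_sort_and_Injecretor.py | group_sorti
-- ===== SOURCE A (Python) =====
-- from typing import Callable, Collection, Iterable, Sequence
--
-- def group_sorti (seq: Sequence) -> Iterable:
--     """Yields items from `seq` grouped while sorted."""
--     slst = []
--     lst = []
--     it = iter(seq)
--     try:
--         a = next(it)
--         lst.append(a)
--     except StopIteration:
--         return slst
--     for i in it:
--         if i >= a:
--             lst.append(i)
--             a = i
--         else:
--             yield lst
--             a = i
--             lst = [a]
--     if lst:
--         yield lst
-- ===== SOURCE B (Python) =====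
-- def group_sorti(seq):
--     """Yields items from `seq` grouped while sorted."""
--     lst = list(seq)
--     n = len(lst)
--     start = 0
--     while start < n:
--         k = start + 1
--         while k < n and lst[k] >= lst[k - 1]:
--             k += 1
--         yield lst[start:k]
--         start = k
-- ===== Notes on version B (the rewrite author's own statement) =====
-- stated objective: alternative
-- what changed: B materializes the sequence, tracks a run-start index and yields slices lst[start:k] at each maximal non-decreasing run, instead of A's element-by-element accumulator list flushed at each descent.
import Mathlib
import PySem

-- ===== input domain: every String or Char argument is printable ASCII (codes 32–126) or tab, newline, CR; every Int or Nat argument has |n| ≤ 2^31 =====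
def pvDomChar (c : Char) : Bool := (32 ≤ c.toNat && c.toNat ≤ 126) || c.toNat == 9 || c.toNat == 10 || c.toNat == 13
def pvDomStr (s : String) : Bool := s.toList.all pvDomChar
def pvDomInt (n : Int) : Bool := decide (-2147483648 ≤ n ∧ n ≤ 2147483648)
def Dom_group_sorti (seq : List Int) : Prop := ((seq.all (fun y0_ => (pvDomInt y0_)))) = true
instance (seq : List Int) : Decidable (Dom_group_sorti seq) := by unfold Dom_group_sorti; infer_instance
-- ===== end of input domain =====

-- B tracks a run-start index and yields slices lst[start:k] of the maximal non-decreasing runs,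
-- instead of A's element-by-element accumulator flushed at each descent; a different decomposition, not claimed faster.

-- ===== PORT A =====
-- A: one pass; lst accumulates the current run, flushed (yielded) at each descent.
def group_sorti_go (it : List Int) (a : Int) (lst : List Int) : List (List Int) :=
  match it with
  | [] => if lst = [] then [] else [lst]
  | i :: rest =>
      if i ≥ a then group_sorti_go rest i (lst ++ [i])
      else lst :: group_sorti_go rest i [i]

def group_sorti (seq : List Int) : List (List Int) :=
  match seq with
  | [] => []
  | a :: it => group_sorti_go it a [a]

-- ===== PORT B =====
-- B's inner while loop: advance k while k < n and lst[k] >= lst[k-1].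
-- lst[k] / lst[k-1] are ported as getD (exact here: the guard k < lst.length keeps both indices in range).
-- fuel (= lst.length, enough for every pass of the while loop) only makes the recursion structural.
def group_sorti_runFrom (lst : List Int) (k : Nat) (fuel : Nat) : Nat :=
  match fuel with
  | 0 => k
  | fuel + 1 =>
      if k < lst.length ∧ lst.getD k 0 ≥ lst.getD (k - 1) 0 then
        group_sorti_runFrom lst (k + 1) fuel
      else k

-- B's outer while loop over the run-start index, yielding the slice lst[start:k]
def group_sorti_altGo (lst : List Int) (start : Nat) (fuel : Nat) : List (List Int) :=
  match fuel with
  | 0 => []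
  | fuel + 1 =>
      if start < lst.length then
        let k := group_sorti_runFrom lst (start + 1) lst.length
        PySem.List.slice lst (some (start : Int)) (some (k : Int)) :: group_sorti_altGo lst k fuel
      else []

def group_sorti_alt (seq : List Int) : List (List Int) :=
  group_sorti_altGo seq 0 seq.length

-- ===== PRECONDITION & SPEC =====
def Spec_group_sorti (seq : List Int) (out : List (List Int)) : Prop := out = group_sorti_alt seq
instance (seq : List Int) (out : List (List Int)) : Decidable (Spec_group_sorti seq out) := by unfold Spec_group_sorti; infer_instance

-- ===== CLAIM (what is proved, stated in full; the proofs are below) =====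
def Claim_equal_group_sorti : Prop := ∀ (seq : List Int), Dom_group_sorti seq → Spec_group_sorti seq (group_sorti seq)

-- ===== LEMMAS AND PROOFS =====
-- proof-side bridge: the length of the maximal chain continuing non-decreasingly from b
def chainRun (b : Int) (rest : List Int) : Nat :=
  match rest with
  | [] => 0
  | i :: rest' => if i ≥ b then 1 + chainRun i rest' else 0

-- proof-side bridge: run-splitting stated structurally (take/drop of the maximal run)
def runSplit (seq : List Int) : List (List Int) :=
  match seq with
  | [] => []
  | b :: rest =>
      let k := chainRun b rest
      (b :: rest.take k) :: runSplit (rest.drop k)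
termination_by seq.length
decreasing_by
  simp only [List.length_cons, List.length_drop]
  omega

theorem group_sorti_go_eq (it : List Int) (a : Int) (lst : List Int) (h : lst ≠ []) :
    group_sorti_go it a lst =
      (lst ++ it.take (chainRun a it)) :: runSplit (it.drop (chainRun a it)) := by
  induction it generalizing a lst with
  | nil => simp [group_sorti_go, chainRun, runSplit, h]
  | cons i rest ih =>
      simp only [group_sorti_go, chainRun]
      by_cases hge : i ≥ a
      · rw [if_pos hge, if_pos hge, ih i (lst ++ [i]) (by simp)]
        simp [Nat.add_comm 1]
      · rw [if_neg hge, if_neg hge, ih i [i] (by simp)]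
        simp only [List.take_zero, List.append_nil, List.drop_zero]
        rw [runSplit]
        simp

theorem group_sorti_runFrom_eq (fuel : Nat) (lst : List Int) (k : Nat)
    (hm : lst.length - k ≤ fuel) (hk : 1 ≤ k) :
    group_sorti_runFrom lst k fuel = k + chainRun (lst.getD (k - 1) 0) (lst.drop k) := by
  induction fuel generalizing k with
  | zero =>
      rw [List.drop_eq_nil_of_le (by omega)]
      simp [group_sorti_runFrom, chainRun]
  | succ fuel ih =>
      rw [group_sorti_runFrom]
      by_cases hlt : k < lst.length
      · have hdrop : lst.drop k = lst[k] :: lst.drop (k + 1) :=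
          List.drop_eq_getElem_cons hlt
        have hgd : lst.getD k 0 = lst[k] := List.getD_eq_getElem lst 0 hlt
        by_cases hge : lst.getD k 0 ≥ lst.getD (k - 1) 0
        · rw [if_pos ⟨hlt, hge⟩]
          rw [ih (k + 1) (by omega) (by omega)]
          rw [hdrop]
          simp only [chainRun]
          rw [if_pos (by rw [← hgd]; exact hge)]
          have : (k + 1) - 1 = k := by omega
          rw [this, hgd]
          omega
        · rw [if_neg (by intro hc; exact hge hc.2)]
          rw [hdrop]
          simp only [chainRun]
          rw [if_neg (by rw [← hgd]; intro hc; exact hge hc)]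
          omega
      · rw [if_neg (by intro hc; omega)]
        rw [List.drop_eq_nil_of_le (by omega)]
        simp [chainRun]

theorem group_sorti_altGo_eq (fuel : Nat) (lst : List Int) (start : Nat)
    (hm : lst.length - start ≤ fuel) :
    group_sorti_altGo lst start fuel = runSplit (lst.drop start) := by
  induction fuel generalizing start with
  | zero =>
      rw [List.drop_eq_nil_of_le (by omega)]
      rw [group_sorti_altGo, runSplit]
  | succ fuel ih =>
      rw [group_sorti_altGo]
      by_cases hlt : start < lst.length
      · rw [if_pos hlt]
        show PySem.List.slice lst (some (start : Int))
            (some ((group_sorti_runFrom lst (start + 1) lst.length : Nat) : Int)) ::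
            group_sorti_altGo lst (group_sorti_runFrom lst (start + 1) lst.length) fuel = _
        have hdrop : lst.drop start = lst[start] :: lst.drop (start + 1) :=
          List.drop_eq_getElem_cons hlt
        have hrf : group_sorti_runFrom lst (start + 1) lst.length =
            (start + 1) + chainRun lst[start] (lst.drop (start + 1)) := by
          rw [group_sorti_runFrom_eq lst.length lst (start + 1) (by omega) (by omega)]
          have h1 : (start + 1) - 1 = start := by omega
          rw [h1, List.getD_eq_getElem lst 0 hlt]
        set r := chainRun lst[start] (lst.drop (start + 1)) with hr
        have hslice : PySem.List.slice lst (some (start : Int))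
            (some ((group_sorti_runFrom lst (start + 1) lst.length : Nat) : Int)) =
            lst[start] :: (lst.drop (start + 1)).take r := by
          rw [PySem.List.slice_natCast, hrf, hdrop]
          have : (start + 1) + r - start = r + 1 := by omega
          rw [this, List.take_succ_cons]
        rw [hslice]
        rw [ih (group_sorti_runFrom lst (start + 1) lst.length) (by rw [hrf]; omega)]
        rw [hrf]
        have hdd : lst.drop ((start + 1) + r) = (lst.drop (start + 1)).drop r := by
          rw [List.drop_drop]
        rw [hdd, hdrop, runSplit]
      · rw [if_neg hlt, List.drop_eq_nil_of_le (by omega), runSplit]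

-- ===== VERDICT (by name: the statement is the Claim_ definition above) =====
theorem group_sorti_spec : Claim_equal_group_sorti := by
  intro seq _
  unfold Spec_group_sorti group_sorti_alt
  rw [group_sorti_altGo_eq seq.length seq 0 (by omega), List.drop_zero]
  match seq with
  | [] => rw [group_sorti, runSplit]
  | a :: it =>
      rw [group_sorti, group_sorti_go_eq it a [a] (by simp), runSplit]
      simp
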